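-- pv_equiv track=rewrite | github.com/felmartins1985/restaurant_orders | src/analyze_log.py | find_days_never_go
-- ===== SOURCE A (Python) =====
-- def find_days_never_go(data, name_person):
--     all_days = set()
--     all_days_person = set()
--     for name, _, day in data:
--         all_days.add(day)
--         if name == name_person:
--             all_days_person.add(day)
--     return all_days.difference(all_days_person)
-- ===== SOURCE B (Python) =====
-- def find_days_never_go(data, name_person):
--     by_day = {}
--     for name, _, day in data:
--         by_day.setdefault(day, set()).add(name)
--     return {day for day, names in by_day.items() if name_person not in names}
-- ===== Notes on version B (the rewrite author's own statement) =====
-- stated objective: alternative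
-- what changed: B builds a per-day index dict mapping each day to the set of names seen that day, then filters the distinct days by absence of the person, instead of maintaining two parallel day-sets and taking a set difference.
import Mathlib
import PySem

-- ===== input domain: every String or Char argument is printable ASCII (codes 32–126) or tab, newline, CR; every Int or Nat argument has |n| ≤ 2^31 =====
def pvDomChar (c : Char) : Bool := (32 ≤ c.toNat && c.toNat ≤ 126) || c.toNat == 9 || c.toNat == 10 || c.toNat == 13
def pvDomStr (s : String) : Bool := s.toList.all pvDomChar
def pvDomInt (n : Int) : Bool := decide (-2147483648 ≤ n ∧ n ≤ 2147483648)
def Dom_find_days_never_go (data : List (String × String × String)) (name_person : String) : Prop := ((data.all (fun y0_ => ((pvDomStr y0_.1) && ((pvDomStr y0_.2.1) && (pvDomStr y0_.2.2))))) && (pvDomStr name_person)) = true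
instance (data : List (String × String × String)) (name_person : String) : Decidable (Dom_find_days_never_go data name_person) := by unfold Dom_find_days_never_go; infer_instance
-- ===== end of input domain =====

-- B replaces A's two parallel day-sets + set difference by a per-day index (day ↦ set of
-- names) built in one pass, answering by filtering the distinct days; alternative, same cost.
-- Both results are Python sets; equality here is on the ports' concrete element lists.

-- ===== PORT A =====
def find_days_never_go (data : List (String × String × String)) (name_person : String) : List String :=
  let r := data.foldl
    (fun (acc : PySem.Set String × PySem.Set String) x =>
      if x.1 == name_person then (PySem.Set.add acc.1 x.2.2, PySem.Set.add acc.2 x.2.2)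
      else (PySem.Set.add acc.1 x.2.2, acc.2))
    (PySem.Set.empty, PySem.Set.empty)
  PySem.Set.diff r.1 r.2

-- ===== PORT B =====
def find_days_never_go_alt (data : List (String × String × String)) (name_person : String) : List String :=
  let by_day : PySem.Dict String (PySem.Set String) :=
    data.foldl (fun d x => d.modify x.2.2 PySem.Set.empty (fun s => PySem.Set.add s x.1))
      PySem.Dict.empty
  PySem.Set.ofList
    ((by_day.items.filter (fun kv => !(PySem.Set.contains kv.2 name_person))).map (·.1))

-- ===== PRECONDITION & SPEC =====
def Spec_find_days_never_go (data : List (String × String × String)) (name_person : String) (out : List String) : Prop := out = find_days_never_go_alt data name_person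
instance (data : List (String × String × String)) (name_person : String) (out : List String) : Decidable (Spec_find_days_never_go data name_person out) := by unfold Spec_find_days_never_go; infer_instance

-- ===== CLAIM (what is proved, stated in full; the proofs are below) =====
def Claim_equal_find_days_never_go : Prop := ∀ (data : List (String × String × String)) (name_person : String), Dom_find_days_never_go data name_person → Spec_find_days_never_go data name_person (find_days_never_go data name_person)

-- ===== LEMMAS AND PROOFS =====

-- filter-then-project equals project-then-filter when the pair predicate only looks at the key
theorem filter_map_fst {α β : Type} (l : List (α × β)) (q : α × β → Bool) (p : α → Bool)
    (h : ∀ kv ∈ l, q kv = p kv.1) :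
    (l.filter q).map (·.1) = (l.map (·.1)).filter p := by
  induction l with
  | nil => rfl
  | cons x xs ih =>
    have hx := h x (List.mem_cons_self)
    have ih' := ih (fun kv hm => h kv (List.mem_cons_of_mem _ hm))
    simp only [List.filter_cons, List.map_cons, hx]
    by_cases hp : p x.1 <;> simp [hp, ih']

-- A's first accumulator collects every day
theorem foldA_fst (name_person : String) (l : List (String × String × String))
    (s sp : PySem.Set String) :
    (l.foldl (fun (acc : PySem.Set String × PySem.Set String) x =>
        if x.1 == name_person then (PySem.Set.add acc.1 x.2.2, PySem.Set.add acc.2 x.2.2)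
        else (PySem.Set.add acc.1 x.2.2, acc.2))
      (s, sp)).1 = PySem.Set.update s (l.map (·.2.2)) := by
  induction l generalizing s sp with
  | nil => rfl
  | cons x xs ih =>
    simp only [List.foldl_cons, List.map_cons]
    by_cases hx : x.1 == name_person
    · simp only [hx, if_true]; exact ih _ _
    · simp only [hx, if_false, Bool.false_eq_true]; exact ih _ _

-- A's second accumulator collects the days of the person's rows
theorem foldA_snd (name_person : String) (l : List (String × String × String))
    (s sp : PySem.Set String) :
    (l.foldl (fun (acc : PySem.Set String × PySem.Set String) x =>
        if x.1 == name_person then (PySem.Set.add acc.1 x.2.2, PySem.Set.add acc.2 x.2.2)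
        else (PySem.Set.add acc.1 x.2.2, acc.2))
      (s, sp)).2 =
      PySem.Set.update sp ((l.filter (fun x => x.1 == name_person)).map (·.2.2)) := by
  induction l generalizing s sp with
  | nil => rfl
  | cons x xs ih =>
    simp only [List.foldl_cons, List.filter_cons]
    by_cases hx : x.1 == name_person
    · simp only [hx, if_true, List.map_cons]; exact ih _ _
    · simp only [hx, if_false, Bool.false_eq_true]; exact ih _ _

-- the grouping fold: the bucket at day k holds exactly the names of rows with that day
theorem getD_fold_group (l : List (String × String × String))
    (d : PySem.Dict String (PySem.Set String)) (k : String) :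
    (l.foldl (fun d x => d.modify x.2.2 PySem.Set.empty (fun s => PySem.Set.add s x.1)) d).getD
        k PySem.Set.empty =
      PySem.Set.update (d.getD k PySem.Set.empty)
        ((l.filter (fun x => x.2.2 == k)).map (·.1)) := by
  induction l generalizing d with
  | nil => simp [PySem.Set.update]
  | cons x xs ih =>
    simp only [List.foldl_cons, List.filter_cons]
    rw [ih]
    by_cases hk : x.2.2 == k
    · have hk' : k = x.2.2 := by simpa [eq_comm] using (beq_iff_eq.mp hk)
      rw [PySem.Dict.getD_modify]
      simp [hk', PySem.Set.update]
    · have hk' : ¬ k = x.2.2 := fun h => hk (by simp [h])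
      rw [PySem.Dict.getD_modify]
      simp [hk, hk']

theorem find_days_never_go_spec' (data : List (String × String × String))
    (name_person : String) :
    find_days_never_go data name_person = find_days_never_go_alt data name_person := by
  simp only [find_days_never_go, find_days_never_go_alt]
  set F := fun (d : PySem.Dict String (PySem.Set String)) (x : String × String × String) =>
    d.modify x.2.2 PySem.Set.empty (fun s => PySem.Set.add s x.1) with hF
  have hnodup : (data.foldl F PySem.Dict.empty).keys.Nodup := by
    rw [hF]
    exact PySem.Dict.nodup_keys_foldl_modify_key data (fun x => x.2.2) _
      (fun _ x s => PySem.Set.add s x.1) PySem.Dict.empty (by simp)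
  have hkeys : (data.foldl F PySem.Dict.empty).keys =
      PySem.Set.ofList (data.map (·.2.2)) := by
    rw [hF]
    rw [PySem.Dict.keys_foldl_modify_key data (fun x => x.2.2) _
      (fun _ x s => PySem.Set.add s x.1) PySem.Dict.empty]
    simp [PySem.Set.update_nil_left]
  -- rewrite B's items-filter as a keys-filter
  have hval : ∀ kv ∈ (data.foldl F PySem.Dict.empty).items,
      (!(PySem.Set.contains kv.2 name_person)) =
      (!(PySem.Set.contains ((data.foldl F PySem.Dict.empty).getD kv.1 PySem.Set.empty)
          name_person)) := by
    intro kv hm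
    rw [PySem.Dict.getD_of_mem_items _ hm hnodup]
  rw [filter_map_fst _ _
    (fun k => !(PySem.Set.contains ((data.foldl F PySem.Dict.empty).getD k PySem.Set.empty)
      name_person)) hval]
  have hkeys' : (data.foldl F PySem.Dict.empty).items.map (·.1) =
      PySem.Set.ofList (data.map (·.2.2)) := hkeys
  rw [hkeys']
  -- A's side
  rw [PySem.Set.diff]
  have h1 := foldA_fst name_person data PySem.Set.empty PySem.Set.empty
  have h2 := foldA_snd name_person data PySem.Set.empty PySem.Set.empty
  rw [h1, h2, PySem.Set.update_empty, PySem.Set.update_empty]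
  -- drop B's outer ofList: the filtered key list is nodup
  rw [PySem.Set.ofList_eq_self_of_nodup _
    (List.Nodup.filter _ (PySem.Set.nodup_ofList _))]
  -- both are filters of the same list; predicates agree pointwise
  apply List.filter_congr
  intro k _
  rw [hF, getD_fold_group]
  simp only [Bool.not_inj_iff]
  rw [PySem.Dict.getD_empty]
  simp only [PySem.Set.update_empty]
  have lhs : PySem.Set.contains
      (PySem.Set.ofList ((data.filter (fun x => x.1 == name_person)).map (·.2.2))) k =
      decide (∃ x ∈ data, x.1 = name_person ∧ x.2.2 = k) := by
    rcases Bool.decide_iff (∃ x ∈ data, x.1 = name_person ∧ x.2.2 = k) with _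
    by_cases h : ∃ x ∈ data, x.1 = name_person ∧ x.2.2 = k
    · simp only [h, decide_true]
      rw [PySem.Set.contains_iff]
      simp only [PySem.Set.mem_ofList, List.mem_map, List.mem_filter]
      obtain ⟨x, hx, h1, h2⟩ := h
      exact ⟨x, ⟨hx, by simp [h1]⟩, h2⟩
    · simp only [h, decide_false]
      rw [Bool.eq_false_iff]
      intro hc
      rw [PySem.Set.contains_iff] at hc
      simp only [PySem.Set.mem_ofList, List.mem_map, List.mem_filter] at hc
      obtain ⟨x, ⟨hx, h1⟩, h2⟩ := hc
      exact h ⟨x, hx, beq_iff_eq.mp h1, h2⟩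
  have rhs : PySem.Set.contains
      (PySem.Set.ofList ((data.filter (fun x => x.2.2 == k)).map (·.1))) name_person =
      decide (∃ x ∈ data, x.1 = name_person ∧ x.2.2 = k) := by
    by_cases h : ∃ x ∈ data, x.1 = name_person ∧ x.2.2 = k
    · simp only [h, decide_true]
      rw [PySem.Set.contains_iff]
      simp only [PySem.Set.mem_ofList, List.mem_map, List.mem_filter]
      obtain ⟨x, hx, h1, h2⟩ := h
      exact ⟨x, ⟨hx, by simp [h2]⟩, h1⟩
    · simp only [h, decide_false]
      rw [Bool.eq_false_iff]
      intro hc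
      rw [PySem.Set.contains_iff] at hc
      simp only [PySem.Set.mem_ofList, List.mem_map, List.mem_filter] at hc
      obtain ⟨x, ⟨hx, h2⟩, h1⟩ := hc
      exact h ⟨x, hx, h1, beq_iff_eq.mp h2⟩
  rw [lhs, rhs]

-- ===== VERDICT (by name: the statement is the Claim_ definition above) =====
theorem find_days_never_go_spec : Claim_equal_find_days_never_go := by
  intro data name_person _
  exact find_days_never_go_spec' data name_person
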